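-- pv_equiv track=rewrite | github.com/sunrenjie/bangus | bangus/utils/staticfiles.py | sort_js_files
-- ===== SOURCE A (Python) =====
-- MODULE_EXT = '.module.js'
--
-- MOCK_EXT = '.mock.js'
--
-- SPEC_EXT = '.spec.js'
--
-- def sort_js_files(js_files):
--     """Sorts JavaScript files in `js_files` into source files, mock files
--     and spec files based on file extension.
--
--     Output:
--
--     * sources: source files for production.  The order of source files
--       is significant and should be listed in the below order:
--
--       - First, all the that defines the other application's angular module.
--         Those files have extension of `.module.js`.  The order among them is
--         not significant.
--
--       - Followed by all other source code files.  The order among them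
--         is not significant.
--
--     * mocks: mock files provide mock data/services for tests.  They have
--       extension of `.mock.js`. The order among them is not significant.
--
--     * specs: spec files for testing.  They have extension of `.spec.js`.
--       The order among them is not significant.
--
--     """
--     modules = [f for f in js_files if f.endswith(MODULE_EXT)]
--     mocks = [f for f in js_files if f.endswith(MOCK_EXT)]
--     specs = [f for f in js_files if f.endswith(SPEC_EXT)]
--
--     other_sources = [f for f in js_files if
--                      not f.endswith(MODULE_EXT)
--                      and not f.endswith(MOCK_EXT)
--                      and not f.endswith(SPEC_EXT)]
--
--     sources = modules + other_sources
--     return sources, mocks, specs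
-- ===== SOURCE B (Python) =====
-- MODULE_EXT = '.module.js'
--
-- MOCK_EXT = '.mock.js'
--
-- SPEC_EXT = '.spec.js'
--
-- def sort_js_files(js_files):
--     # Build the final `sources` list directly: module files are inserted at a
--     # moving boundary index `nmod` (end of the module block), every other
--     # source file is appended after the block.  No separate modules/others
--     # lists and no concatenation step exist.
--     sources = []
--     mocks = []
--     specs = []
--     nmod = 0
--     for f in js_files:
--         if f.endswith(MOCK_EXT):
--             mocks.append(f)
--         elif f.endswith(SPEC_EXT):
--             specs.append(f)
--         elif f.endswith(MODULE_EXT):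
--             sources.insert(nmod, f)
--             nmod += 1
--         else:
--             sources.append(f)
--     return sources, mocks, specs
-- ===== Notes on version B (the rewrite author's own statement) =====
-- stated objective: alternative
-- what changed: Instead of A's four comprehension scans concatenated at the end, B builds the final sources list directly in one pass, inserting each .module.js file at a moving boundary index (end of the module block) and appending other sources after it, so no separate modules/other_sources lists and no concatenation step exist.
import Mathlib
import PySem

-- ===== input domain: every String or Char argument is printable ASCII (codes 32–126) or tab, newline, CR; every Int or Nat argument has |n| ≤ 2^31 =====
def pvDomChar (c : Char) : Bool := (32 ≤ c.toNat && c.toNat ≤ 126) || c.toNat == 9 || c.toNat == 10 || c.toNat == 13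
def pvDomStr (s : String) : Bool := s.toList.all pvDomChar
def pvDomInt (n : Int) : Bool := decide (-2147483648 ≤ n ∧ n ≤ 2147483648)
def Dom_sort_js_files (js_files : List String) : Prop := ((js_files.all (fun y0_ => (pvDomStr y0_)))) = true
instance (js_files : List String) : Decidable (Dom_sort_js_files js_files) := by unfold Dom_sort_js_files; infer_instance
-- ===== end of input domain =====

-- B builds the final sources list directly in one pass, inserting module files at a
-- moving boundary index instead of A's four comprehension scans plus concatenation (alternative).

-- ===== PORT A =====
def MODULE_EXT : String := ".module.js"
def MOCK_EXT : String := ".mock.js"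
def SPEC_EXT : String := ".spec.js"

def sort_js_files (js_files : List String) : List String × List String × List String :=
  let modules := js_files.filter (fun f => PySem.Str.endswith f MODULE_EXT)
  let mocks := js_files.filter (fun f => PySem.Str.endswith f MOCK_EXT)
  let specs := js_files.filter (fun f => PySem.Str.endswith f SPEC_EXT)
  let other_sources := js_files.filter (fun f =>
      !PySem.Str.endswith f MODULE_EXT && !PySem.Str.endswith f MOCK_EXT
        && !PySem.Str.endswith f SPEC_EXT)
  let sources := modules ++ other_sources
  (sources, mocks, specs)

-- ===== PORT B =====
-- one step of Source B's loop: state = (sources, mocks, specs, nmod)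
def altStep (acc : List String × List String × List String × Int) (f : String) :
    List String × List String × List String × Int :=
  let (src, mk, sp, n) := acc
  if PySem.Str.endswith f MOCK_EXT then (src, mk ++ [f], sp, n)
  else if PySem.Str.endswith f SPEC_EXT then (src, mk, sp ++ [f], n)
  else if PySem.Str.endswith f MODULE_EXT then (PySem.List.insert src n f, mk, sp, n + 1)
  else (src ++ [f], mk, sp, n)

def sort_js_files_alt (js_files : List String) : List String × List String × List String :=
  let (src, mk, sp, _) := js_files.foldl altStep ([], [], [], 0)
  (src, mk, sp)

-- ===== PRECONDITION & SPEC =====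
def Spec_sort_js_files (js_files : List String) (out : List String × List String × List String) : Prop := out = sort_js_files_alt js_files
instance (js_files : List String) (out : List String × List String × List String) : Decidable (Spec_sort_js_files js_files out) := by unfold Spec_sort_js_files; infer_instance

-- ===== CLAIM (what is proved, stated in full; the proofs are below) =====
def Claim_equal_sort_js_files : Prop := ∀ (js_files : List String), Dom_sort_js_files js_files → Spec_sort_js_files js_files (sort_js_files js_files)

-- ===== LEMMAS AND PROOFS =====

-- the three suffixes are mutually exclusive
theorem excl_mock (f : String) (h : PySem.Str.endswith f MOCK_EXT = true) :
    PySem.Str.endswith f MODULE_EXT = false := by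
  rw [PySem.Str.endswith_eq] at h ⊢
  by_contra hc
  have hM : PySem.Chars.endswith f.toList MODULE_EXT.toList = true := by
    cases hx : PySem.Chars.endswith f.toList MODULE_EXT.toList
    · exact absurd hx hc
    · rfl
  have h1 := (PySem.Chars.endswith_iff (s := f.toList) (p := MOCK_EXT.toList)).1 h
  have h2 := (PySem.Chars.endswith_iff (s := f.toList) (p := MODULE_EXT.toList)).1 hM
  have h3 : MOCK_EXT.toList <:+ MODULE_EXT.toList :=
    List.suffix_of_suffix_length_le h1 h2 (by decide)
  exact absurd h3 (by decide)

theorem excl_spec (f : String) (h : PySem.Str.endswith f SPEC_EXT = true) :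
    PySem.Str.endswith f MODULE_EXT = false ∧ PySem.Str.endswith f MOCK_EXT = false := by
  rw [PySem.Str.endswith_eq] at h
  have h1 := (PySem.Chars.endswith_iff (s := f.toList) (p := SPEC_EXT.toList)).1 h
  rw [PySem.Str.endswith_eq, PySem.Str.endswith_eq]
  constructor
  · by_contra hc
    have hM : PySem.Chars.endswith f.toList MODULE_EXT.toList = true := by
      cases hx : PySem.Chars.endswith f.toList MODULE_EXT.toList
      · exact absurd hx hc
      · rfl
    have h2 := (PySem.Chars.endswith_iff (s := f.toList) (p := MODULE_EXT.toList)).1 hM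
    have h3 : SPEC_EXT.toList <:+ MODULE_EXT.toList :=
      List.suffix_of_suffix_length_le h1 h2 (by decide)
    exact absurd h3 (by decide)
  · by_contra hc
    have hK : PySem.Chars.endswith f.toList MOCK_EXT.toList = true := by
      cases hx : PySem.Chars.endswith f.toList MOCK_EXT.toList
      · exact absurd hx hc
      · rfl
    have h2 := (PySem.Chars.endswith_iff (s := f.toList) (p := MOCK_EXT.toList)).1 hK
    have h3 : SPEC_EXT.toList <:+ MOCK_EXT.toList :=
      List.suffix_of_suffix_length_le h1 h2 (by decide)
    exact absurd h3 (by decide)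

-- fold invariant for B: the sources accumulator is always (module block) ++ (other block),
-- and nmod is the length of the module block
theorem fold_alt (js : List String) (m o k s : List String) :
    js.foldl altStep (m ++ o, k, s, (m.length : Int)) =
      (m ++ js.filter (fun f => !PySem.Str.endswith f MOCK_EXT
              && !PySem.Str.endswith f SPEC_EXT && PySem.Str.endswith f MODULE_EXT)
         ++ o ++ js.filter (fun f => !PySem.Str.endswith f MOCK_EXT
              && !PySem.Str.endswith f SPEC_EXT && !PySem.Str.endswith f MODULE_EXT),
       k ++ js.filter (fun f => PySem.Str.endswith f MOCK_EXT),
       s ++ js.filter (fun f => !PySem.Str.endswith f MOCK_EXT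
              && PySem.Str.endswith f SPEC_EXT),
       ((m.length + (js.filter (fun f => !PySem.Str.endswith f MOCK_EXT
              && !PySem.Str.endswith f SPEC_EXT && PySem.Str.endswith f MODULE_EXT)).length : Nat) : Int)) := by
  induction js generalizing m o k s with
  | nil => simp
  | cons f t ih =>
    simp only [List.foldl_cons, List.filter_cons, altStep]
    by_cases hK : PySem.Str.endswith f MOCK_EXT = true
    · have := ih (m := m) (o := o) (k := k ++ [f]) (s := s)
      simp [PySem.Str.endswith_eq] at hK
      simp [hK, this]
    · simp only [Bool.not_eq_true] at hK
      by_cases hS : PySem.Str.endswith f SPEC_EXT = true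
      · have := ih (m := m) (o := o) (k := k) (s := s ++ [f])
        simp [PySem.Str.endswith_eq] at hS
        simp [PySem.Str.endswith_eq] at hK
        simp [hK, hS, this]
      · simp only [Bool.not_eq_true] at hS
        by_cases hM : PySem.Str.endswith f MODULE_EXT = true
        · have hins : PySem.List.insert (m ++ o) ((m.length : Nat) : Int) f
              = (m ++ [f]) ++ o := by
            rw [PySem.List.insert_natCast (m ++ o) m.length f (by simp)]
            simp
          have := ih (m := m ++ [f]) (o := o) (k := k) (s := s)
          simp only [List.length_append, List.length_cons, List.length_nil] at this
          simp only [PySem.Str.endswith_eq] at hK hS hM hins ⊢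
          simp only [hK, hS, hM, if_true, Bool.not_false, Bool.and_self, Bool.true_and]
          rw [hins]
          push_cast
          rw [show (m.length : Int) + 1 = ((m.length + 1 : Nat) : Int) by push_cast; ring]
          rw [this]
          simp
          ring_nf
        · simp only [Bool.not_eq_true] at hM
          have := ih (m := m) (o := o ++ [f]) (k := k) (s := s)
          rw [List.append_assoc] at this
          simp [PySem.Str.endswith_eq] at hK hS hM
          simp [hK, hS, hM, this]

-- ===== VERDICT (by name: the statement is the Claim_ definition above) =====
theorem sort_js_files_spec : Claim_equal_sort_js_files := by
  intro js _
  unfold Spec_sort_js_files sort_js_files sort_js_files_alt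
  have h := fold_alt js [] [] [] []
  simp only [List.nil_append, List.append_nil, List.length_nil, Nat.cast_zero] at h
  rw [h]
  refine congrArg₂ Prod.mk ?_ (congrArg₂ Prod.mk rfl ?_)
  · refine congrArg₂ (· ++ ·) ?_ ?_
    · apply List.filter_congr
      intro f _
      cases hM : PySem.Str.endswith f MODULE_EXT
      · simp
      · have h1 : PySem.Str.endswith f MOCK_EXT = false := by
          cases hx : PySem.Str.endswith f MOCK_EXT
          · rfl
          · rw [excl_mock f hx] at hM; exact absurd hM (by decide)
        have h2 : PySem.Str.endswith f SPEC_EXT = false := by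
          cases hx : PySem.Str.endswith f SPEC_EXT
          · rfl
          · rw [(excl_spec f hx).1] at hM; exact absurd hM (by decide)
        simp [PySem.Str.endswith_eq] at h1 h2 ⊢
        simp [h1, h2]
    · apply List.filter_congr
      intro f _
      cases hM : PySem.Str.endswith f MODULE_EXT <;>
        cases hK : PySem.Str.endswith f MOCK_EXT <;>
          cases hS : PySem.Str.endswith f SPEC_EXT <;>
            simp_all [PySem.Str.endswith_eq]
  · apply List.filter_congr
    intro f _
    cases hS : PySem.Str.endswith f SPEC_EXT
    · simp
    · have h2 := (excl_spec f hS).2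
      simp [PySem.Str.endswith_eq] at h2 ⊢
      simp [h2]
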